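-- pv_equiv track=rewrite | github.com/JVRC03/LeetCode | 1784-check-if-binary-string-has-at-most-one-segment-of-ones/1784-check-if-binary-string-has-at-most-one-segment-of-ones.py | checkOnesSegment
-- ===== SOURCE A (Python) =====
-- def checkOnesSegment(s: str) -> bool:
--     a, b, mid = -1, -1, 1000
--
--     for i in range(len(s)):
--         if s[i] == '1':
--             if a == -1:
--                 a = i
--                 b = i
--             else:
--                 b = i
--         else:
--             if mid == 1000:
--                 mid = i
--
--     if a <= b <= mid:
--         return True
--
--     return False
-- ===== SOURCE B (Python) =====
-- def checkOnesSegment(s: str) -> bool: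
--     # drop the leading run of ones; the string is a single segment of ones
--     # (under A's reading: any non-'1' character separates) iff no '1' remains
--     return '1' not in s.lstrip('1')
-- ===== Notes on version B (the rewrite author's own statement) =====
-- stated objective: simpler
-- what changed: B drops the leading run of one-characters and checks that no one-character remains, instead of A's index loop tracking first-one/last-one/first-zero positions and comparing them; this removes all positional bookkeeping (and A's mid=1000 sentinel).
-- intended difference: On strings of length at least 1002 whose first 1000 characters are all ones, A's sentinel mid=1000 collides with the real index 1000, so A returns False on an unbroken all-ones string of length at least 1002 and True on a 1000-ones prefix followed by a separator, a further ones-run and a non-ones tail with no later one; B returns the intended answer (True for a single unbroken run of ones of any length, False whenever a one follows a non-one character). — e.g. on checkOnesSegment(("111111111111111111111111111111111111111111111111111111111111111111111111111111111111111111111111111111111111111111111…): A returns false, B returns true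
import Mathlib
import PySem

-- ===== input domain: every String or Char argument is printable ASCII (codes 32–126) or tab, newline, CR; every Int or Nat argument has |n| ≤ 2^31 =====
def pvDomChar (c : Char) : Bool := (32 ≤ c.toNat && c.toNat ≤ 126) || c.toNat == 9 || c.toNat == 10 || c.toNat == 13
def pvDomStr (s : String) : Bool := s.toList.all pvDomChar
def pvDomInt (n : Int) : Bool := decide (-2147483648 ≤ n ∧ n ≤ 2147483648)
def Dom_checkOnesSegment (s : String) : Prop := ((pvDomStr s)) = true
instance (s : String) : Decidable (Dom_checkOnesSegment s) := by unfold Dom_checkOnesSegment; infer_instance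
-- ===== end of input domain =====

-- B rewrites A's index loop (first-one/last-one/first-zero bookkeeping) as: drop the leading
-- run of ones, then check that no one-character remains; B avoids A's mid=1000 sentinel (see D_ below).

-- ===== PORT A =====
def checkOnesSegment (s : String) : Bool :=
  let cs := s.toList
  let st := (PySem.List.pyRange 0 (cs.length : Int) 1).foldl
      (fun (st : Int × Int × Int) (i : Int) =>
        if PySem.List.pyGetD cs i ' ' == '1' then
          if st.1 == -1 then (i, i, st.2.2) else (st.1, i, st.2.2)
        else
          if st.2.2 == 1000 then (st.1, st.2.1, i) else st)
      (-1, -1, 1000)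
  if st.1 ≤ st.2.1 ∧ st.2.1 ≤ st.2.2 then true else false

-- ===== PORT B =====
-- s.lstrip('1') has no PySem primitive with a chars argument; List.dropWhile (· == '1')
-- is exact for it (drops exactly the leading run of '1' characters).
def checkOnesSegment_alt (s : String) : Bool :=
  !PySem.Chars.isIn ['1'] (s.toList.dropWhile (fun c => c == '1'))

-- ===== PRECONDITION & SPEC =====
-- On strings of length at least 1002 whose first 1000 characters are all ones, A's sentinel
-- mid=1000 collides with the real index 1000 (an unbroken all-ones string of length >= 1002 gets
-- False; a 1000-ones prefix, a separator, a further ones-run and a non-ones tail with no later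
-- one gets True); B returns the intended answer (True for a single unbroken run of ones of any
-- length, False whenever a one follows a non-one character).
def D_checkOnesSegment (s : String) : Prop :=
  (s.toList.dropWhile (fun c => c == '1') = [] ∧ 1002 ≤ s.toList.length)
  ∨ ((s.toList.takeWhile (fun c => c == '1')).length = 1000
     ∧ (s.toList.drop 1001).takeWhile (fun c => c == '1') ≠ []
     ∧ (s.toList.drop 1001).dropWhile (fun c => c == '1') ≠ []
     ∧ '1' ∉ (s.toList.drop 1001).dropWhile (fun c => c == '1'))
instance (s : String) : Decidable (D_checkOnesSegment s) := by unfold D_checkOnesSegment; infer_instance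
def Spec_checkOnesSegment (s : String) (out : Bool) : Prop := ¬ D_checkOnesSegment s → out = checkOnesSegment_alt s
instance (s : String) (out : Bool) : Decidable (Spec_checkOnesSegment s out) := by unfold Spec_checkOnesSegment; infer_instance
def pvDiffWitness_checkOnesSegment : String := ("111111111111111111111111111111111111111111111111111111111111111111111111111111111111111111111111111111111111111111111111111111111111111111111111111111111111111111111111111111111111111111111111111111111111111111111111111111111111111111111111111111111111111111111111111111111111111111111111111111111111111111111111111111111111111111111111111111111111111111111111111111111111111111111111111111111111111111111111111111111111111111111111111111111111111111111111111111111111111111111111111111111111111111111111111111111111111111111111111111111111111111111111111111111111111111111111111111111111111111111111111111111111111111111111111111111111111111111111111111111111111111111111111111111111111111111111111111111111111111111111111111111111111111111111111111111111111111111111111111111111111111111111111111111111111111111111111111111111111111111111111111111111111111111111111111111111111111111111111111111111111111111111111111111111111111111111111111111111111111111111111111111111111111111111111111111111111111")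
def pvDiffWitnessOut_checkOnesSegment : Bool × Bool := (false, true)

-- ===== CLAIM (what is proved, stated in full; the proofs are below) =====
def Claim_unchanged_checkOnesSegment : Prop := ∀ (s : String), Dom_checkOnesSegment s → Spec_checkOnesSegment s (checkOnesSegment s)
def Claim_changed_checkOnesSegment : Prop := Dom_checkOnesSegment (pvDiffWitness_checkOnesSegment) ∧ D_checkOnesSegment (pvDiffWitness_checkOnesSegment) ∧ checkOnesSegment (pvDiffWitness_checkOnesSegment) = pvDiffWitnessOut_checkOnesSegment.1 ∧ checkOnesSegment_alt (pvDiffWitness_checkOnesSegment) = pvDiffWitnessOut_checkOnesSegment.2 ∧ pvDiffWitnessOut_checkOnesSegment.1 ≠ pvDiffWitnessOut_checkOnesSegment.2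
def Claim_exact_checkOnesSegment : Prop := ∀ (s : String), Dom_checkOnesSegment s → D_checkOnesSegment s → checkOnesSegment s ≠ checkOnesSegment_alt s

-- ===== LEMMAS AND PROOFS =====

-- A's loop, written structurally over the remaining characters (i = absolute index).
def pvLoopA : List Char → Int → Int × Int × Int → Int × Int × Int
  | [], _, st => st
  | c :: cs, i, st =>
      pvLoopA cs (i + 1)
        (if c == '1' then
           if st.1 == -1 then (i, i, st.2.2) else (st.1, i, st.2.2)
         else
           if st.2.2 == 1000 then (st.1, st.2.1, i) else st)

def pvRes (st : Int × Int × Int) : Bool := if st.1 ≤ st.2.1 ∧ st.2.1 ≤ st.2.2 then true else false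

lemma pvLoopA_append (xs : List Char) : ∀ (ys : List Char) (i : Int) (st : Int × Int × Int),
    pvLoopA (xs ++ ys) i st = pvLoopA ys (i + xs.length) (pvLoopA xs i st) := by
  induction xs with
  | nil => intro ys i st; simp [pvLoopA]
  | cons c xs ih =>
      intro ys i st
      simp only [List.cons_append, pvLoopA, ih, List.length_cons]
      congr 1
      push_cast
      ring

lemma pvDoomed (cs : List Char) : ∀ (i a b mid : Int), mid < b → mid ≠ 1000 → mid < i →
    pvRes (pvLoopA cs i (a, b, mid)) = false := by
  induction cs with
  | nil =>
      intro i a b mid h1 h2 h3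
      simp only [pvLoopA, pvRes]
      split
      · omega
      · rfl
  | cons c cs ih =>
      intro i a b mid h1 h2 h3
      simp only [pvLoopA]
      by_cases hc : c == '1'
      · simp only [hc, if_true]
        by_cases ha : a == -1
        · simp only [ha, if_true]; exact ih (i+1) i i mid h3 h2 (by omega)
        · simp only [ha]; exact ih (i+1) a i mid h3 h2 (by omega)
      · simp only [hc]
        have hm : (mid == (1000:Int)) = false := by simpa using h2
        simp only [hm]
        exact ih (i+1) a b mid h1 h2 (by omega)

lemma pvPhase2 (cs : List Char) : ∀ (i a b mid : Int), a ≤ b → b ≤ mid → mid ≠ 1000 → mid < i →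
    pvRes (pvLoopA cs i (a, b, mid)) = !cs.contains '1' := by
  induction cs with
  | nil =>
      intro i a b mid h1 h2 h3 h4
      simp only [pvLoopA, pvRes]
      split
      · simp
      · omega
  | cons c cs ih =>
      intro i a b mid h1 h2 h3 h4
      simp only [pvLoopA]
      by_cases hc : c == '1'
      · simp only [hc, if_true]
        have hc' : c = '1' := by simpa using hc
        have : ('1' : Char) ∈ c :: cs := by simp [hc']
        rw [show (c :: cs).contains '1' = true by simpa using this]
        by_cases ha : a == -1
        · simp only [ha, if_true]
          exact pvDoomed cs (i+1) i i mid (by omega) h3 (by omega)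
        · simp only [ha]
          exact pvDoomed cs (i+1) a i mid (by omega) h3 (by omega)
      · have hc0 : (c == '1') = false := by simpa using hc
        have hm : (mid == (1000:Int)) = false := by simpa using h3
        simp only [hc0, hm, Bool.false_eq_true, if_false]
        rw [ih (i+1) a b mid h1 h2 h3 (by omega)]
        have hc' : c ≠ '1' := by simpa using hc
        simp [Ne.symm hc']

lemma pvOnesRun (os : List Char) : ∀ (i a b mid : Int), (∀ c ∈ os, c = '1') → a ≠ -1 →
    pvLoopA os i (a, b, mid) = (a, if os.isEmpty then b else i + os.length - 1, mid) := by
  induction os with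
  | nil => intro i a b mid h1 h2; simp [pvLoopA]
  | cons c os ih =>
      intro i a b mid h1 h2
      have hc : (c == '1') = true := by simp [h1 c (by simp)]
      have ha : (a == (-1:Int)) = false := by simpa using h2
      simp only [pvLoopA, hc, if_true, ha, Bool.false_eq_true, if_false]
      rw [ih (i+1) a i mid (fun d hd => h1 d (by simp [hd])) h2]
      rcases os with _ | ⟨d, os'⟩
      · simp
      · have e1 : ((d :: os').isEmpty) = false := rfl
        have e2 : ((c :: d :: os').isEmpty) = false := rfl
        simp only [e1, e2, Bool.false_eq_true, if_false, List.length_cons, Prod.mk.injEq]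
        refine ⟨trivial, ?_, trivial⟩
        push_cast
        ring

lemma pvOnesRunInit (os : List Char) (i b mid : Int) (h1 : ∀ c ∈ os, c = '1') (h0 : 0 ≤ i)
    (hne : os ≠ []) : pvLoopA os i (-1, b, mid) = (i, i + os.length - 1, mid) := by
  obtain ⟨c, os', rfl⟩ := List.exists_cons_of_ne_nil hne
  have hc : (c == '1') = true := by simp [h1 c (by simp)]
  simp only [pvLoopA, hc, if_true, beq_self_eq_true]
  rw [pvOnesRun os' (i+1) i i mid (fun d hd => h1 d (by simp [hd])) (by omega)]
  rcases os' with _ | ⟨d, os''⟩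
  · simp
  · have e1 : ((d :: os'').isEmpty) = false := rfl
    simp only [e1, Bool.false_eq_true, if_false, List.length_cons, Prod.mk.injEq]
    refine ⟨trivial, ?_, trivial⟩
    push_cast
    ring


lemma pvBridge (cs : List Char) : ∀ (suf pre : List Char) (st : Int × Int × Int),
    pre ++ suf = cs →
    (PySem.List.pyRange (pre.length : Int) (cs.length : Int) 1).foldl
      (fun (st : Int × Int × Int) (i : Int) =>
        if PySem.List.pyGetD cs i ' ' == '1' then
          if st.1 == -1 then (i, i, st.2.2) else (st.1, i, st.2.2)
        else
          if st.2.2 == 1000 then (st.1, st.2.1, i) else st) st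
    = pvLoopA suf (pre.length : Int) st := by
  intro suf
  induction suf with
  | nil =>
      intro pre st h
      have hle : (cs.length : Int) ≤ (pre.length : Int) := by subst h; simp
      rw [PySem.List.pyRange_one_eq_nil hle]
      simp [pvLoopA]
  | cons c suf ih =>
      intro pre st h
      have hlt : (pre.length : Int) < (cs.length : Int) := by
        subst h; simp
      rw [PySem.List.pyRange_one_cons hlt]
      simp only [List.foldl_cons]
      have hget : PySem.List.pyGetD cs ((pre.length : Nat) : Int) ' ' = c := by
        subst h
        rw [PySem.List.pyGetD_natCast]
        simp [List.getD]
      rw [hget]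
      have h2 : (pre ++ [c]) ++ suf = cs := by simpa using h
      have := ih (pre ++ [c])
        (if c == '1' then
           if st.1 == -1 then (((pre.length : Nat) : Int), ((pre.length : Nat) : Int), st.2.2)
           else (st.1, ((pre.length : Nat) : Int), st.2.2)
         else
           if st.2.2 == 1000 then (st.1, st.2.1, ((pre.length : Nat) : Int)) else st) h2
      simp only [List.length_append, List.length_cons, List.length_nil, Nat.cast_add,
        Nat.cast_one, zero_add] at this
      rw [this]
      simp [pvLoopA]

lemma pvA_eq (s : String) :
    checkOnesSegment s = pvRes (pvLoopA s.toList 0 (-1, -1, 1000)) := by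
  have := pvBridge s.toList s.toList [] (-1, -1, 1000) rfl
  simp only [List.length_nil, Nat.cast_zero] at this
  simp only [checkOnesSegment]
  rw [this]
  rfl

lemma pvIsInOne (t : List Char) : PySem.Chars.isIn ['1'] t = t.contains '1' := by
  by_cases h : '1' ∈ t
  · have h2 : PySem.Chars.isIn ['1'] t = true := by
      rw [PySem.Chars.isIn_iff_infix]
      obtain ⟨u, v, rfl⟩ := List.append_of_mem h
      exact ⟨u, v, by simp⟩
    simp [h2, h]
  · have h2 : PySem.Chars.isIn ['1'] t = false := by
      rw [PySem.Chars.isIn_eq_false_iff]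
      intro hin
      exact h (hin.subset (by simp))
    simp [h2, h]

lemma pvB_eq (s : String) :
    checkOnesSegment_alt s = !(s.toList.dropWhile (fun c => c == '1')).contains '1' := by
  unfold checkOnesSegment_alt
  rw [pvIsInOne]

-- closed-form characterization of A's loop result (proof helper only)
def pvCharA (cs : List Char) : Bool :=
  match cs.dropWhile (fun c => c == '1') with
  | [] => decide (cs.length ≤ 1001)
  | _ :: r' =>
      if (cs.takeWhile (fun c => c == '1')).length = 1000 then
        match r'.dropWhile (fun c => c == '1') with
        | [] => decide (r' = [])
        | _ :: r2' => !r2'.contains '1'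
      else !r'.contains '1'

lemma pvSentinelHigh (cs : List Char) (i a b : Int) (h0 : 0 ≤ a) (hab : a ≤ b) (hb : b ≤ 1000)
    (hi : 1001 ≤ i) :
    pvRes (pvLoopA cs i (a, b, 1000)) =
      match cs.dropWhile (fun c => c == '1') with
      | [] => decide (cs = [])
      | _ :: r' => !r'.contains '1' := by
  have hsplit := List.takeWhile_append_dropWhile (p := fun c => c == '1') (l := cs)
  have hones : ∀ c ∈ cs.takeWhile (fun c => c == '1'), c = '1' := by
    intro c hc
    simpa using List.mem_takeWhile_imp hc
  have htlen : (0:Int) ≤ ((cs.takeWhile (fun c => c == '1')).length : Int) := by positivity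
  conv_lhs => rw [← hsplit]
  rw [pvLoopA_append, pvOnesRun _ i a b 1000 hones (by omega)]
  rcases hr : cs.dropWhile (fun c => c == '1') with _ | ⟨c, r'⟩
  · -- no non-'1' remains
    by_cases ht : (cs.takeWhile (fun c => c == '1')).isEmpty
    · have ht' : cs.takeWhile (fun c => c == '1') = [] := by simpa using ht
      have : cs = [] := by rw [← hsplit, ht', hr]; rfl
      simp [pvLoopA, pvRes, this, hab, hb]
    · have ht' : cs.takeWhile (fun c => c == '1') ≠ [] := by simpa using ht
      have hcs : cs ≠ [] := by
        intro hq; exact ht' (by simp [hq])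
      have hlen : (1:Int) ≤ ((cs.takeWhile (fun c => c == '1')).length : Int) := by
        have := List.length_pos_iff.mpr ht'
        exact_mod_cast this
      simp only [pvLoopA, pvRes, ht, Bool.false_eq_true, if_false]
      rw [if_neg (by omega)]
      simp [hcs]
  · have hc : c ≠ '1' := by
      have := List.head_dropWhile_not (fun c => c == '1') (l := cs) (by simp [hr])
      simpa [hr] using this
    have hc0 : (c == '1') = false := by simpa using hc
    simp only [pvLoopA, hc0, Bool.false_eq_true, if_false, beq_self_eq_true, if_true]
    set bf := (if (cs.takeWhile (fun c => c == '1')).isEmpty = true then b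
               else i + ((cs.takeWhile (fun c => c == '1')).length : Int) - 1) with hbf
    have hbf1 : a ≤ bf ∧ bf ≤ i + ((cs.takeWhile (fun c => c == '1')).length : Int) := by
      rw [hbf]; split <;> omega
    rw [pvPhase2 r' _ a bf _ hbf1.1 hbf1.2 (by omega) (by omega)]

lemma pvAchar (cs : List Char) :
    pvRes (pvLoopA cs 0 (-1, -1, 1000)) = pvCharA cs := by
  have hsplit := List.takeWhile_append_dropWhile (p := fun c => c == '1') (l := cs)
  have hones : ∀ c ∈ cs.takeWhile (fun c => c == '1'), c = '1' := by
    intro c hc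
    simpa using List.mem_takeWhile_imp hc
  have htlen : (0:Int) ≤ ((cs.takeWhile (fun c => c == '1')).length : Int) := by positivity
  rcases hr : cs.dropWhile (fun c => c == '1') with _ | ⟨c, r'⟩
  · -- cs is all '1'
    simp only [pvCharA, hr]
    have hcst : cs.takeWhile (fun c => c == '1') = cs := by
      conv_rhs => rw [← hsplit, hr]
      simp
    rcases hcs : cs with _ | ⟨d, cs'⟩
    · simp [pvLoopA, pvRes]
    · rw [← hcs]
      have hne : cs ≠ [] := by simp [hcs]
      conv_lhs => rw [← hsplit, hr, List.append_nil, hcst]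
      rw [pvOnesRunInit cs 0 (-1) 1000 (fun c hc => hones c (by rwa [hcst])) (le_refl 0) hne]
      have hlen : (1:Int) ≤ (cs.length : Int) := by
        have := List.length_pos_iff.mpr hne
        exact_mod_cast this
      simp only [pvRes]
      by_cases hbig : (cs.length : Int) ≤ 1001
      · rw [if_pos (by omega)]
        symm
        simp only [decide_eq_true_eq]
        omega
      · rw [if_neg (by omega)]
        symm
        simp only [decide_eq_false_iff_not]
        omega
  · simp only [pvCharA, hr]
    have hc : c ≠ '1' := by
      have := List.head_dropWhile_not (fun c => c == '1') (l := cs) (by simp [hr])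
      simpa [hr] using this
    have hc0 : (c == '1') = false := by simpa using hc
    by_cases ht : (cs.takeWhile (fun c => c == '1')).isEmpty
    · -- no leading ones: k = 0 ≠ 1000
      have ht' : cs.takeWhile (fun c => c == '1') = [] := by simpa using ht
      have hcs : cs = c :: r' := by rw [← hsplit, ht', hr]; rfl
      rw [if_neg (by simp [ht'])]
      conv_lhs => rw [hcs]
      simp only [pvLoopA, hc0, Bool.false_eq_true, if_false, beq_self_eq_true, if_true]
      exact pvPhase2 r' 1 (-1) (-1) 0 (le_refl _) (by omega) (by omega) (by omega)
    · have ht' : cs.takeWhile (fun c => c == '1') ≠ [] := by simpa using ht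
      have hlen : (1:Int) ≤ ((cs.takeWhile (fun c => c == '1')).length : Int) := by
        have := List.length_pos_iff.mpr ht'
        exact_mod_cast this
      conv_lhs => rw [← hsplit, hr, pvLoopA_append]
      rw [pvOnesRunInit _ 0 (-1) 1000 hones (le_refl 0) ht']
      simp only [pvLoopA, hc0, Bool.false_eq_true, if_false, beq_self_eq_true, if_true,
        zero_add]
      by_cases hk : (cs.takeWhile (fun c => c == '1')).length = 1000
      · rw [if_pos hk]
        have hk' : ((cs.takeWhile (fun c => c == '1')).length : Int) = 1000 := by
          exact_mod_cast hk
        rw [hk']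
        have := pvSentinelHigh r' 1001 0 999 (le_refl 0) (by omega) (by omega) (le_refl _)
        rw [show ((1000:Int) - 1) = 999 by norm_num, show ((1000:Int) + 1) = 1001 by norm_num]
        exact this
      · rw [if_neg hk]
        have hk' : ((cs.takeWhile (fun c => c == '1')).length : Int) ≠ 1000 := by
          exact_mod_cast hk
        exact pvPhase2 r' _ 0 _ _ (by omega) (by omega) hk' (by omega)

lemma pvDrop1001 (cs : List Char) (c : Char) (r' : List Char)
    (hk : (cs.takeWhile (fun c => c == '1')).length = 1000)
    (hr : cs.dropWhile (fun c => c == '1') = c :: r') :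
    cs.drop 1001 = r' := by
  conv_lhs => rw [← List.takeWhile_append_dropWhile (p := fun c => c == '1') (l := cs), hr,
    show 1001 = (cs.takeWhile (fun c => c == '1')).length + 1 by omega]
  rw [List.drop_length_add_append]
  rfl

lemma pvAgree (cs : List Char)
    (hnD : ¬ ((cs.dropWhile (fun c => c == '1') = [] ∧ 1002 ≤ cs.length)
      ∨ ((cs.takeWhile (fun c => c == '1')).length = 1000
         ∧ (cs.drop 1001).takeWhile (fun c => c == '1') ≠ []
         ∧ (cs.drop 1001).dropWhile (fun c => c == '1') ≠ []
         ∧ '1' ∉ (cs.drop 1001).dropWhile (fun c => c == '1')))) :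
    pvCharA cs = !(cs.dropWhile (fun c => c == '1')).contains '1' := by
  rcases not_or.mp hnD with ⟨h1, h2⟩
  rcases hr : cs.dropWhile (fun c => c == '1') with _ | ⟨c, r'⟩
  · simp only [pvCharA, hr]
    have hlen : cs.length ≤ 1001 := by
      by_contra h
      exact h1 ⟨hr, by omega⟩
    simp [hlen]
  · simp only [pvCharA, hr]
    have hc : c ≠ '1' := by
      have := List.head_dropWhile_not (fun c => c == '1') (l := cs) (by simp [hr])
      simpa [hr] using this
    by_cases hk : (cs.takeWhile (fun c => c == '1')).length = 1000
    · rw [if_pos hk]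
      have hdrop : cs.drop 1001 = r' := pvDrop1001 cs c r' hk hr
      rcases hr2 : r'.dropWhile (fun c => c == '1') with _ | ⟨c2, r2'⟩
      · have hall : ∀ x ∈ r', (x == '1') = true := by
          simpa using List.dropWhile_eq_nil_iff.mp hr2
        cases hre : r' with
        | nil => simp [Ne.symm hc]
        | cons e es =>
            have he : e = '1' := by simpa using hall e (by simp [hre])
            simp [he, Ne.symm hc]
      · have hc2 : c2 ≠ '1' := by
          have := List.head_dropWhile_not (fun c => c == '1') (l := r') (by simp [hr2])
          simpa [hr2] using this
        by_cases ht2 : r'.takeWhile (fun c => c == '1') = []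
        · have hre : r' = c2 :: r2' := by
            conv_lhs => rw [← List.takeWhile_append_dropWhile (p := fun c => c == '1') (l := r'),
              ht2, hr2]
            rfl
          rw [hre]
          simp [Ne.symm hc, Ne.symm hc2]
        · have hmem : '1' ∈ r'.dropWhile (fun c => c == '1') := by
            by_contra hmem
            exact h2 ⟨hk, by rw [hdrop]; exact ht2, by rw [hdrop]; simp [hr2],
              by rw [hdrop]; exact hmem⟩
          have hm2 : '1' ∈ r2' := by
            rcases List.mem_cons.mp (hr2 ▸ hmem) with h | h
            · exact absurd h.symm hc2
            · exact h
          have hm1 : '1' ∈ r' := (List.dropWhile_suffix (fun c => c == '1')).subset hmem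
          simp [hm1, hm2]
    · rw [if_neg hk]
      simp [Ne.symm hc]

lemma pvDisagree (cs : List Char)
    (hD : (cs.dropWhile (fun c => c == '1') = [] ∧ 1002 ≤ cs.length)
      ∨ ((cs.takeWhile (fun c => c == '1')).length = 1000
         ∧ (cs.drop 1001).takeWhile (fun c => c == '1') ≠ []
         ∧ (cs.drop 1001).dropWhile (fun c => c == '1') ≠ []
         ∧ '1' ∉ (cs.drop 1001).dropWhile (fun c => c == '1'))) :
    pvCharA cs ≠ !(cs.dropWhile (fun c => c == '1')).contains '1' := by
  rcases hD with ⟨hr, hlen⟩ | ⟨hk, ht2, hr2, hnot⟩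
  · simp only [pvCharA, hr]
    simp
    omega
  · have hlong : 1002 ≤ cs.length := by
      have hne : cs.drop 1001 ≠ [] := fun h => ht2 (by simp [h])
      have h1 : (cs.drop 1001).length ≠ 0 := fun h => hne (List.length_eq_zero_iff.mp h)
      rw [List.length_drop] at h1
      omega
    rcases hrx : cs.dropWhile (fun c => c == '1') with _ | ⟨c, r'⟩
    · exfalso
      have hcst : cs.takeWhile (fun c => c == '1') = cs := by
        conv_rhs => rw [← List.takeWhile_append_dropWhile (p := fun c => c == '1') (l := cs), hrx]
        simp
      rw [hcst] at hk
      omega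
    · have hc : c ≠ '1' := by
        have := List.head_dropWhile_not (fun c => c == '1') (l := cs) (by simp [hrx])
        simpa [hrx] using this
      have hdrop : cs.drop 1001 = r' := pvDrop1001 cs c r' hk hrx
      rw [hdrop] at ht2 hr2 hnot
      simp only [pvCharA, hrx, if_pos hk]
      rcases hr2x : r'.dropWhile (fun c => c == '1') with _ | ⟨c2, r2'⟩
      · exact absurd hr2x hr2
      · show (!r2'.contains '1') ≠ !(c :: r').contains '1'
        rw [hr2x] at hnot
        have hnot2 : '1' ∉ r2' := fun h => hnot (by simp [h])
        have hone : '1' ∈ r' := by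
          rcases List.exists_mem_of_ne_nil _ ht2 with ⟨e, he⟩
          have he1 : e = '1' := by simpa using List.mem_takeWhile_imp he
          exact he1 ▸ (List.takeWhile_prefix (fun c => c == '1')).subset he
        have hL : (!r2'.contains '1') = true := by simpa using hnot2
        have hR : (!(c :: r').contains '1') = false := by
          simp [hone]
        rw [hL, hR]
        simp

-- ===== VERDICT (by name: the statement is the Claim_ definition above) =====
theorem checkOnesSegment_spec : Claim_unchanged_checkOnesSegment := by
  intro s _ hnD
  rw [pvA_eq, pvB_eq, pvAchar]
  exact pvAgree s.toList hnD

set_option maxRecDepth 100000 in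
lemma pvWitEq : pvDiffWitness_checkOnesSegment = String.ofList (List.replicate 1002 '1') := by
  decide

lemma pvWitToList : pvDiffWitness_checkOnesSegment.toList = List.replicate 1002 '1' := by
  rw [pvWitEq]
  exact String.toList_ofList

set_option maxRecDepth 40000 in
lemma pvWitDrop : (List.replicate 1002 '1').dropWhile (fun c => c == '1') = [] :=
  List.dropWhile_eq_nil_iff.mpr (fun x hx => by rw [List.eq_of_mem_replicate hx]; rfl)

set_option maxRecDepth 40000 in
theorem checkOnesSegment_changed : Claim_changed_checkOnesSegment := by
  unfold Claim_changed_checkOnesSegment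
  refine ⟨?_, ?_, ?_, ?_, by decide⟩
  · show pvDomStr _ = true
    unfold pvDomStr
    rw [pvWitToList]
    exact List.all_eq_true.mpr (fun c hc => by rw [List.eq_of_mem_replicate hc]; rfl)
  · unfold D_checkOnesSegment
    left
    rw [pvWitToList, pvWitDrop]
    simp
  · rw [pvA_eq, pvAchar, pvWitToList]
    show pvCharA (List.replicate 1002 '1') = false
    simp only [pvCharA, pvWitDrop, List.length_replicate]
    rfl
  · rw [pvB_eq, pvWitToList, pvWitDrop]
    rfl

theorem checkOnesSegment_tight : Claim_exact_checkOnesSegment := by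
  intro s _ hD
  rw [pvA_eq, pvB_eq, pvAchar]
  exact pvDisagree s.toList hD
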